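-- pv_equiv track=rewrite | github.com/is0xjh25/social-media-analytics | utility.py | sort_tweet_count
-- ===== SOURCE A (Python) =====
-- def sort_tweet_count(data:{}, max_rank:int) -> {}:
-- 	data = sorted(data.items(), key=lambda x: x[1]['tweet_count'], reverse=True)
-- 	res = {}
-- 	count = 1
-- 	rank = 0
-- 	for index, user in enumerate(data):
-- 		if index == 0:
-- 			rank += 1
-- 		else:
-- 			if data[index-1][1]['tweet_count'] == user[1]['tweet_count']:
-- 				count += 1
-- 			else:
-- 				rank += count
-- 				if rank > max_rank: break
-- 				count = 1
-- 		res[user[0]] = {'rank': rank, 'tweet_count': user[1]['tweet_count']}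
-- 	return res
-- ===== SOURCE B (Python) =====
-- def _groups(items):
--     """Runs of equal tweet_count in the (already sorted) item list."""
--     groups = []
--     i = 0
--     while i < len(items):
--         tc = items[i][1]['tweet_count']
--         j = i + 1
--         while j < len(items) and items[j][1]['tweet_count'] == tc:
--             j += 1
--         groups.append((tc, [name for name, _ in items[i:j]]))
--         i = j
--     return groups
--
--
-- def sort_tweet_count(data, max_rank):
--     items = sorted(data.items(), key=lambda x: x[1]['tweet_count'], reverse=True)
--     groups = _groups(items)
--     res = {}
--     if not groups:
--         return res
--     # the leading group always holds rank 1
--     tc, names = groups[0]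
--     for name in names:
--         res[name] = {'rank': 1, 'tweet_count': tc}
--     rank = 1 + len(names)
--     for tc, names in groups[1:]:
--         if rank > max_rank:
--             break
--         for name in names:
--             res[name] = {'rank': rank, 'tweet_count': tc}
--         rank += len(names)
--     return res
-- ===== Notes on version B (the rewrite author's own statement) =====
-- stated objective: alternative
-- what changed: Replaces A's per-element rank/count state machine with a two-phase decomposition: first collect runs of equal tweet_count into explicit groups, then emit the leading group at rank 1 and each later group at the cumulative rank with a single cutoff test per group.
import Mathlib
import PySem

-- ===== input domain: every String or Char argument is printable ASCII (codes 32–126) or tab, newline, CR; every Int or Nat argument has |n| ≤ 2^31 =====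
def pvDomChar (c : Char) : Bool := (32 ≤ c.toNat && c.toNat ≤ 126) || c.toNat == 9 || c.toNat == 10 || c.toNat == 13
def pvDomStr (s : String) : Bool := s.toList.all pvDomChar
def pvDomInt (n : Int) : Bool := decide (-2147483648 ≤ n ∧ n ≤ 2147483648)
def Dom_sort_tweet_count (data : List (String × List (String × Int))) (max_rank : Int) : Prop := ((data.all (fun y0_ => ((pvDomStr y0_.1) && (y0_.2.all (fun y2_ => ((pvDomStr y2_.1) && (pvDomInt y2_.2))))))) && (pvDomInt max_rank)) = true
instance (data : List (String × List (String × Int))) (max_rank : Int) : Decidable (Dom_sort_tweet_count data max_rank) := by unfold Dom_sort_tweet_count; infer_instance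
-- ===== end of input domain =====

-- B is a two-phase decomposition (group the sorted list into runs of equal
-- tweet_count, then emit group by group); same cost as A, different structure.

-- ===== PORT A =====
-- x[1]['tweet_count'] : first-match lookup in the inner dict; total form with default 0 —
-- Python raises KeyError when the key is absent, and Pre_ excludes exactly those inputs.
def tweetCount (d : List (String × Int)) : Int := (PySem.Dict.mk d).getD "tweet_count" 0

def emitEntry (u : String × List (String × Int)) (rank : Int) : List (String × Int) :=
  [("rank", rank), ("tweet_count", tweetCount u.2)]

-- the for-loop from index ≥ 1 on: prev is data[index-1], count/rank the loop state; returning res models break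
def aGo (maxRank : Int) (prev : String × List (String × Int)) (count rank : Int) :
    List (String × List (String × Int)) → PySem.Dict String (List (String × Int)) →
    PySem.Dict String (List (String × Int))
  | [], res => res
  | u :: tl, res =>
    if tweetCount prev.2 = tweetCount u.2 then
      aGo maxRank u (count + 1) rank tl (res.insert u.1 (emitEntry u rank))
    else
      let rank' := rank + count
      if rank' > maxRank then res
      else aGo maxRank u 1 rank' tl (res.insert u.1 (emitEntry u rank'))

def sort_tweet_count (data : List (String × List (String × Int))) (max_rank : Int) : List (String × List (String × Int)) :=
  let s := PySem.List.sorted (PySem.Dict.ofList data).items (fun x => tweetCount x.2) true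
  match s with
  | [] => (PySem.Dict.empty : PySem.Dict String (List (String × Int))).items
  | u :: tl =>
    -- index 0: rank becomes 1, entry always emitted
    (aGo max_rank u 1 1 tl (PySem.Dict.empty.insert u.1 (emitEntry u 1))).items

-- ===== PORT B =====
-- Source B's _groups: the outer while advances run by run; the inner while collecting one
-- run of equal tweet_count is ported as takeWhile/dropWhile of that run (exact).
def mkGroups : List (String × List (String × Int)) → List (Int × List String)
  | [] => []
  | u :: tl =>
    let tc := tweetCount u.2
    (tc, u.1 :: (tl.takeWhile (fun v => tweetCount v.2 == tc)).map (·.1)) ::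
      mkGroups (tl.dropWhile (fun v => tweetCount v.2 == tc))
  termination_by l => l.length
  decreasing_by
    have := List.length_dropWhile_le (fun v => tweetCount v.2 == tc) tl
    simp
    omega

-- 'for name in names: res[name] = …'
def emitGroup (rank tc : Int) (names : List String)
    (res : PySem.Dict String (List (String × Int))) : PySem.Dict String (List (String × Int)) :=
  names.foldl (fun r n => r.insert n [("rank", rank), ("tweet_count", tc)]) res

-- 'for tc, names in groups[1:]' with the break
def bLoop (maxRank : Int) :
    List (Int × List String) → Int → PySem.Dict String (List (String × Int)) →
    PySem.Dict String (List (String × Int))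
  | [], _, res => res
  | (tc, names) :: gs, rank, res =>
    if rank > maxRank then res
    else bLoop maxRank gs (rank + names.length) (emitGroup rank tc names res)

def sort_tweet_count_alt (data : List (String × List (String × Int))) (max_rank : Int) : List (String × List (String × Int)) :=
  let items := PySem.List.sorted (PySem.Dict.ofList data).items (fun x => tweetCount x.2) true
  match mkGroups items with
  | [] => (PySem.Dict.empty : PySem.Dict String (List (String × Int))).items
  | (tc, names) :: gs =>
    (bLoop max_rank gs (1 + names.length) (emitGroup 1 tc names PySem.Dict.empty)).items

-- ===== PRECONDITION & SPEC =====
-- Pre_ excludes exactly the inputs on which A raises KeyError: some user's inner dict lacks 'tweet_count'.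
def Pre_sort_tweet_count (data : List (String × List (String × Int))) (max_rank : Int) : Prop :=
  (data.all (fun u => u.2.any (fun p => p.1 == "tweet_count"))) = true
instance (data : List (String × List (String × Int))) (max_rank : Int) : Decidable (Pre_sort_tweet_count data max_rank) := by unfold Pre_sort_tweet_count; infer_instance

def pvWitness_sort_tweet_count : (List (String × List (String × Int))) × Int :=
  ([("alice", [("tweet_count", 3)]), ("bob", [("tweet_count", 1)]), ("carol", [("tweet_count", 3)])], 2)

def Spec_sort_tweet_count (data : List (String × List (String × Int))) (max_rank : Int) (out : List (String × List (String × Int))) : Prop := out = sort_tweet_count_alt data max_rank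
instance (data : List (String × List (String × Int))) (max_rank : Int) (out : List (String × List (String × Int))) : Decidable (Spec_sort_tweet_count data max_rank out) := by unfold Spec_sort_tweet_count; infer_instance

-- ===== CLAIM =====
def Claim_equal_sort_tweet_count : Prop := ∀ (data : List (String × List (String × Int))) (max_rank : Int), Dom_sort_tweet_count data max_rank → Pre_sort_tweet_count data max_rank → Spec_sort_tweet_count data max_rank (sort_tweet_count data max_rank)

-- ===== LEMMAS AND PROOFS =====

-- the last element of a run of tweet_count t still has tweet_count t
lemma tcLast (same : List (String × List (String × Int))) (prev : String × List (String × Int))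
    (t : Int) (hs : ∀ v ∈ same, tweetCount v.2 = t) (hp : tweetCount prev.2 = t) :
    tweetCount (same.getLastD prev).2 = t := by
  induction same generalizing prev with
  | nil => simpa using hp
  | cons v tl ih =>
    rw [List.getLastD_cons]
    exact ih v (fun w hw => hs w (List.mem_cons_of_mem _ hw)) (hs v List.mem_cons_self)

lemma dropWhile_head_false {α : Type} (p : α → Bool) (l : List α) (a : α)
    (h : (l.dropWhile p).head? = some a) : p a = false := by
  induction l with
  | nil => simp [List.dropWhile] at h
  | cons x tl ih =>
    rw [List.dropWhile_cons] at h
    by_cases hx : p x = true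
    · rw [if_pos hx] at h; exact ih h
    · rw [if_neg hx] at h
      simp at h
      subst h
      simpa using hx

-- A's loop across one run of equal tweet_count: rank and the entries stay fixed,
-- count grows by the run's length, and the inserts are exactly emitGroup's.
lemma run_eq (maxRank : Int) (rest : List (String × List (String × Int))) :
    ∀ (same : List (String × List (String × Int))) (prev : String × List (String × Int))
      (count rank : Int) (res : PySem.Dict String (List (String × Int))),
    (∀ v ∈ same, tweetCount v.2 = tweetCount prev.2) →
    aGo maxRank prev count rank (same ++ rest) res
      = aGo maxRank (same.getLastD prev) (count + same.length) rank rest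
          (emitGroup rank (tweetCount prev.2) (same.map (·.1)) res) := by
  intro same
  induction same with
  | nil => intro prev count rank res _; simp [emitGroup]
  | cons v tl ih =>
    intro prev count rank res hall
    have hv : tweetCount v.2 = tweetCount prev.2 := hall v List.mem_cons_self
    rw [List.cons_append, aGo, if_pos hv.symm]
    have htl : ∀ w ∈ tl, tweetCount w.2 = tweetCount v.2 := by
      intro w hw; rw [hv]; exact hall w (List.mem_cons_of_mem _ hw)
    rw [ih v (count + 1) rank _ htl]
    rw [List.getLastD_cons]
    congr 1
    all_goals simp only [emitGroup, List.map_cons, List.foldl_cons, emitEntry, hv,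
      List.length_cons, Nat.cast_add, Nat.cast_one]
    all_goals try ring

-- main correspondence: entering a fresh group, A with state (prev, count, rank)
-- behaves as B's group loop at rank + count over the runs of the remaining list
lemma loop_eq (maxRank : Int) :
    ∀ (n : Nat) (rest : List (String × List (String × Int))), rest.length ≤ n →
    ∀ (prev : String × List (String × Int)) (count rank : Int)
      (res : PySem.Dict String (List (String × Int))),
    (∀ h ∈ rest.head?, tweetCount h.2 ≠ tweetCount prev.2) →
    aGo maxRank prev count rank rest res = bLoop maxRank (mkGroups rest) (rank + count) res := by
  intro n
  induction n with
  | zero =>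
    intro rest hlen _ _ _ _ _
    have : rest = [] := List.eq_nil_of_length_eq_zero (Nat.le_zero.mp hlen)
    subst this
    simp [aGo, mkGroups, bLoop]
  | succ n ih =>
    intro rest hlen prev count rank res hne
    match rest with
    | [] => simp [aGo, mkGroups, bLoop]
    | u :: tl =>
      have hneu : tweetCount u.2 ≠ tweetCount prev.2 := hne u (by simp)
      rw [aGo, if_neg (fun h => hneu h.symm), mkGroups]
      simp only []
      set tc := tweetCount u.2 with htc
      set same := tl.takeWhile (fun v => tweetCount v.2 == tc) with hsame
      set rest' := tl.dropWhile (fun v => tweetCount v.2 == tc) with hrest'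
      rw [bLoop]
      by_cases hbr : rank + count > maxRank
      · rw [if_pos hbr, if_pos hbr]
      · rw [if_neg hbr, if_neg hbr]
        have hallsame : ∀ v ∈ same, tweetCount v.2 = tweetCount u.2 := by
          intro v hv
          have := List.mem_takeWhile_imp hv
          simpa using this
        have hsplit : tl = same ++ rest' := (List.takeWhile_append_dropWhile).symm
        rw [hsplit, run_eq maxRank rest' same u 1 (rank + count) _ hallsame]
        have hlast : tweetCount (same.getLastD u).2 = tweetCount u.2 :=
          tcLast same u (tweetCount u.2) hallsame rfl
        have hlen' : rest'.length ≤ n := by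
          have h1 := List.length_dropWhile_le (fun v => tweetCount v.2 == tc) tl
          simp only [← hrest'] at h1
          simp only [List.length_cons] at hlen
          omega
        have hhead : ∀ h ∈ rest'.head?, tweetCount h.2 ≠ tweetCount (same.getLastD u).2 := by
          intro h hh
          have := dropWhile_head_false _ tl h hh
          rw [hlast]
          simpa using this
        rw [ih rest' hlen' (same.getLastD u) (1 + same.length) (rank + count) _ hhead]
        congr 1
        all_goals simp only [emitGroup, List.foldl_cons, emitEntry,
          List.length_cons, List.length_map, Nat.cast_add, Nat.cast_one,
          List.foldl_nil]
        all_goals try ring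

-- both ports agree once factored through the common sorted list
lemma top_eq (maxRank : Int) (s : List (String × List (String × Int))) :
    (match s with
     | [] => (PySem.Dict.empty : PySem.Dict String (List (String × Int))).items
     | u :: tl => (aGo maxRank u 1 1 tl (PySem.Dict.empty.insert u.1 (emitEntry u 1))).items)
    = (match mkGroups s with
       | [] => (PySem.Dict.empty : PySem.Dict String (List (String × Int))).items
       | (tc, names) :: gs =>
         (bLoop maxRank gs (1 + names.length) (emitGroup 1 tc names PySem.Dict.empty)).items) := by
  match s with
  | [] => simp [mkGroups]
  | u :: tl =>
    simp only [mkGroups]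
    set tc := tweetCount u.2 with htc
    set same := tl.takeWhile (fun v => tweetCount v.2 == tc) with hsame
    set rest' := tl.dropWhile (fun v => tweetCount v.2 == tc) with hrest'
    have hallsame : ∀ v ∈ same, tweetCount v.2 = tweetCount u.2 := by
      intro v hv
      have := List.mem_takeWhile_imp hv
      simpa using this
    have hsplit : tl = same ++ rest' := (List.takeWhile_append_dropWhile).symm
    rw [hsplit, run_eq maxRank rest' same u 1 1 _ hallsame]
    have hlast : tweetCount (same.getLastD u).2 = tweetCount u.2 :=
      tcLast same u (tweetCount u.2) hallsame rfl
    have hhead : ∀ h ∈ rest'.head?, tweetCount h.2 ≠ tweetCount (same.getLastD u).2 := by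
      intro h hh
      have := dropWhile_head_false _ tl h hh
      rw [hlast]
      simpa using this
    rw [loop_eq maxRank rest'.length rest' le_rfl (same.getLastD u) (1 + same.length) 1 _ hhead]
    congr 2
    all_goals simp only [emitGroup, List.foldl_cons, emitEntry,
      List.length_cons, List.length_map, Nat.cast_add, Nat.cast_one]
    all_goals try ring

-- ===== VERDICT (by name: the statement is the Claim_ definition above) =====
theorem sort_tweet_count_spec : Claim_equal_sort_tweet_count := by
  intro data max_rank _ _
  unfold Spec_sort_tweet_count sort_tweet_count sort_tweet_count_alt
  exact top_eq max_rank (PySem.List.sorted (PySem.Dict.ofList data).items (fun x => tweetCount x.2) true)
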